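-- pv_equiv track=rewrite | github.com/Pererenchina/auto-monitor-bot | parsers/base_parser.py | extract_brand_model_from_properties
-- ===== SOURCE A (Python) =====
-- from typing import List, Dict, Optional
--
-- def extract_brand_model_from_properties(properties: List, ad: Optional[Dict] = None) -> tuple:
--     """
--     Извлечение марки и модели из properties или ad
--
--     Args:
--         properties: Список свойств объявления
--         ad: Словарь с данными объявления (опционально)
--
--     Returns:
--         Кортеж (brand, model)
--     """
--     brand = ''
--     model = ''
--
--     # Сначала пробуем напрямую из ad (если передан)
--     if ad:
--         brand_raw = ad.get('brand') or ad.get('brandName') or ad.get('make')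
--         if brand_raw:
--             if isinstance(brand_raw, dict):
--                 brand = brand_raw.get('name', '') or str(brand_raw)
--             else:
--                 brand = str(brand_raw)
--
--         model_raw = ad.get('model') or ad.get('modelName')
--         if model_raw:
--             if isinstance(model_raw, dict):
--                 model = model_raw.get('name', '') or str(model_raw)
--             else:
--                 model = str(model_raw)
--
--     # Затем пробуем из properties
--     for prop in properties:
--         if isinstance(prop, dict):
--             prop_name = prop.get('name', '')
--             prop_value = prop.get('value', '')
--             if prop_name == 'brand' and not brand:
--                 brand = str(prop_value)
--             elif prop_name == 'model' and not model:
--                 model = str(prop_value)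
--
--     return brand, model
-- ===== SOURCE B (Python) =====
-- def extract_brand_model_from_properties(properties, ad=None):
--     def from_ad(keys):
--         # first truthy ad[k] over the key list, unwrapping dict values via 'name'
--         if not ad:
--             return ''
--         for k in keys:
--             raw = ad.get(k)
--             if raw:
--                 if isinstance(raw, dict):
--                     return raw.get('name', '') or str(raw)
--                 return str(raw)
--         return ''
--
--     def first_prop(name):
--         # first non-empty str(value) among dict props with that name
--         for prop in properties:
--             if isinstance(prop, dict) and prop.get('name', '') == name:
--                 v = str(prop.get('value', ''))
--                 if v:
--                     return v
--         return ''
--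
--     brand = from_ad(('brand', 'brandName', 'make')) or first_prop('brand')
--     model = from_ad(('model', 'modelName')) or first_prop('model')
--     return brand, model
-- ===== Notes on version B (the rewrite author's own statement) =====
-- stated objective: alternative
-- what changed: B replaces A's stateful single loop with two pure searches: a generic key-list scan over the ad for the first truthy value, and a per-name linear search of properties for the first non-empty value, combined with plain or-fallbacks.
import Mathlib
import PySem

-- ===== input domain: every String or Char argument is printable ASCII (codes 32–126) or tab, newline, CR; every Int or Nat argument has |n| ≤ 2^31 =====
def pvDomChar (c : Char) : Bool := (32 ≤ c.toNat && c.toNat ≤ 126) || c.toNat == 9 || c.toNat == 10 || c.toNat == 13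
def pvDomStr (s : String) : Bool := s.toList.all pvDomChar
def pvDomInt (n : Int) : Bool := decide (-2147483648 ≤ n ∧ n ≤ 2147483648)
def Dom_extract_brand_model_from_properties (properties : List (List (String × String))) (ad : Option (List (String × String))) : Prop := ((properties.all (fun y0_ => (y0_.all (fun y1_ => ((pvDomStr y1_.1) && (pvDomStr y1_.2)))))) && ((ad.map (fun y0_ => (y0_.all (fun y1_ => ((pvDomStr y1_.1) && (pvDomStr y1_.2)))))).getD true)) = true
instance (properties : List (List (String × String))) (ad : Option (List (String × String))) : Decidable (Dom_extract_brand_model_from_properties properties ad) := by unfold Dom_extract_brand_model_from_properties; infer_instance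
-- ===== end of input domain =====

-- B replaces A's stateful single loop with two pure searches: a generic key-list scan of the ad
-- for the first truthy value, and a per-name linear search of properties for the first non-empty
-- value, combined by plain or-fallbacks.  Under the type convention all dict values are strings,
-- so Python truthiness is the empty-string test, str(x) is the identity and isinstance(...,dict)
-- branches never fire.

-- ===== PORT A =====
-- A-side helpers: Python `x or y` / `if x:` on optional strings (None and '' falsy).
def pyOrStr (a b : Option String) : Option String :=
  match a with
  | some s => if s = "" then b else some s
  | none => b

def pyTruthyStr (a : Option String) : String :=
  match a with
  | some s => if s = "" then "" else s
  | none => ""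

def extract_brand_model_from_properties (properties : List (List (String × String))) (ad : Option (List (String × String))) : String × String :=
  let bm0 : String × String :=
    match ad with
    | some d =>
      if d = [] then ("", "")
      else
        let dd := PySem.Dict.mk d
        let brand := pyTruthyStr (pyOrStr (pyOrStr (dd.get? "brand") (dd.get? "brandName")) (dd.get? "make"))
        let model := pyTruthyStr (pyOrStr (dd.get? "model") (dd.get? "modelName"))
        (brand, model)
    | none => ("", "")
  properties.foldl (fun bm prop =>
    let p := PySem.Dict.mk prop
    let name := p.getD "name" ""
    let value := p.getD "value" ""
    if name = "brand" ∧ bm.1 = "" then (value, bm.2)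
    else if name = "model" ∧ bm.2 = "" then (bm.1, value)
    else bm) bm0

-- ===== PORT B =====
-- `for k in keys: raw = ad.get(k); if raw: return str(raw)`
def fromAdGo (dd : PySem.Dict String String) : List String → String
  | [] => ""
  | k :: ks =>
    match dd.get? k with
    | some v => if v = "" then fromAdGo dd ks else v
    | none => fromAdGo dd ks

def fromAd (ad : Option (List (String × String))) (keys : List String) : String :=
  match ad with
  | none => ""
  | some d => if d = [] then "" else fromAdGo (PySem.Dict.mk d) keys

-- `for prop in properties: if prop.get('name','')==name: v=str(prop.get('value','')); if v: return v`
def firstProp : List (List (String × String)) → String → String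
  | [], _ => ""
  | prop :: ps, name =>
    let p := PySem.Dict.mk prop
    if p.getD "name" "" = name then
      let v := p.getD "value" ""
      if v ≠ "" then v else firstProp ps name
    else firstProp ps name

def extract_brand_model_from_properties_alt (properties : List (List (String × String))) (ad : Option (List (String × String))) : String × String :=
  let ab := fromAd ad ["brand", "brandName", "make"]
  let brand := if ab = "" then firstProp properties "brand" else ab
  let am := fromAd ad ["model", "modelName"]
  let model := if am = "" then firstProp properties "model" else am
  (brand, model)

-- ===== PRECONDITION & SPEC =====
def Spec_extract_brand_model_from_properties (properties : List (List (String × String))) (ad : Option (List (String × String))) (out : String × String) : Prop := out = extract_brand_model_from_properties_alt properties ad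
instance (properties : List (List (String × String))) (ad : Option (List (String × String))) (out : String × String) : Decidable (Spec_extract_brand_model_from_properties properties ad out) := by unfold Spec_extract_brand_model_from_properties; infer_instance

-- ===== CLAIM (what is proved, stated in full; the proofs are below) =====
def Claim_equal_extract_brand_model_from_properties : Prop := ∀ (properties : List (List (String × String))) (ad : Option (List (String × String))), Dom_extract_brand_model_from_properties properties ad → Spec_extract_brand_model_from_properties properties ad (extract_brand_model_from_properties properties ad)

-- ===== LEMMAS AND PROOFS =====

-- A's loop, started at (b, m), only fills an empty slot with the first non-empty matching value.
theorem loopA_eq (ps : List (List (String × String))) : ∀ b m : String,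
    ps.foldl (fun bm prop =>
      let p := PySem.Dict.mk prop
      let name := p.getD "name" ""
      let value := p.getD "value" ""
      if name = "brand" ∧ bm.1 = "" then (value, bm.2)
      else if name = "model" ∧ bm.2 = "" then (bm.1, value)
      else bm) (b, m)
    = (if b = "" then firstProp ps "brand" else b,
       if m = "" then firstProp ps "model" else m) := by
  induction ps with
  | nil => intro b m; simp [firstProp]
  | cons prop ps ih =>
    intro b m
    simp only [List.foldl_cons, firstProp]
    set name := (PySem.Dict.mk prop).getD "name" "" with hname
    set value := (PySem.Dict.mk prop).getD "value" "" with hvalue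
    by_cases hb : name = "brand" ∧ b = ""
    · obtain ⟨hn, hb'⟩ := hb
      subst hb'
      simp only [hn]
      rw [ih]
      by_cases hv : value = ""
      · simp [hv]
      · simp [hv]
    · by_cases hm : name = "model" ∧ m = ""
      · obtain ⟨hn, hm'⟩ := hm
        subst hm'
        rw [if_neg hb, if_pos (And.intro hn rfl)]
        rw [ih]
        have hnb : ¬ (name = "brand") := by simp [hn]
        by_cases hv : value = ""
        · simp [hv, hn]
        · simp [hv, hn]
      · rw [if_neg hb, if_neg hm, ih]
        simp only [Prod.mk.injEq]
        refine ⟨?_, ?_⟩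
        · by_cases hbe : b = ""
          · have hnb : ¬ (name = "brand") := fun h => hb ⟨h, hbe⟩
            simp [hbe, hnb]
          · simp [hbe]
        · by_cases hme : m = ""
          · have hnm : ¬ (name = "model") := fun h => hm ⟨h, hme⟩
            simp [hme, hnm]
          · simp [hme]

-- A's or-chains equal B's key-list scan.
theorem chain3 (dd : PySem.Dict String String) (k1 k2 k3 : String) :
    pyTruthyStr (pyOrStr (pyOrStr (dd.get? k1) (dd.get? k2)) (dd.get? k3))
      = fromAdGo dd [k1, k2, k3] := by
  simp only [fromAdGo]
  rcases dd.get? k1 with _ | v1 <;> rcases dd.get? k2 with _ | v2 <;>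
    rcases dd.get? k3 with _ | v3 <;> simp [pyOrStr, pyTruthyStr] <;> split_ifs <;> simp_all

theorem chain2 (dd : PySem.Dict String String) (k1 k2 : String) :
    pyTruthyStr (pyOrStr (dd.get? k1) (dd.get? k2)) = fromAdGo dd [k1, k2] := by
  simp only [fromAdGo]
  rcases dd.get? k1 with _ | v1 <;> rcases dd.get? k2 with _ | v2 <;>
    simp [pyOrStr, pyTruthyStr] <;> split_ifs <;> simp_all

theorem extract_brand_model_from_properties_spec_aux
    (properties : List (List (String × String))) (ad : Option (List (String × String))) :
    extract_brand_model_from_properties properties ad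
      = extract_brand_model_from_properties_alt properties ad := by
  unfold extract_brand_model_from_properties extract_brand_model_from_properties_alt
  cases ad with
  | none => rw [loopA_eq]; simp [fromAd]
  | some d =>
    by_cases hd : d = []
    · rw [loopA_eq]; simp [fromAd, hd]
    · simp only [hd, if_false]
      rw [loopA_eq, chain3, chain2]
      simp [fromAd, hd]

-- ===== VERDICT (by name: the statement is the Claim_ definition above) =====
theorem extract_brand_model_from_properties_spec : Claim_equal_extract_brand_model_from_properties := by
  intro properties ad _
  exact extract_brand_model_from_properties_spec_aux properties ad
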